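-- pv_equiv track=rewrite | github.com/jjoshua2/arc_agi | dupes/44d8ac46_group-047/test_correct/1206.py | transform
-- ===== SOURCE A (Python) =====
-- def transform(grid: list[list[int]]) -> list[list[int]]:
--     if not grid or not grid[0]:
--         return [row[:] for row in grid]
--     h = len(grid)
--     w = len(grid[0])
--     output = [row[:] for row in grid]
--     for n in range(1, min(h, w) + 1):
--         for r in range(h - n + 1):
--             for c in range(w - n + 1):
--                 # Only consider internal squares
--                 if r == 0 or r + n == h or c == 0 or c + n == w:
--                     continue
--                 # Check all inside are 0
--                 all_zero = True
--                 for i in range(r, r + n):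
--                     for j in range(c, c + n):
--                         if grid[i][j] != 0:
--                             all_zero = False
--                             break
--                     if not all_zero:
--                         break
--                 if not all_zero:
--                     continue
--                 # Check boundaries all 5
--                 boundaries_ok = True
--                 # top
--                 for j in range(c, c + n):
--                     if grid[r - 1][j] != 5:
--                         boundaries_ok = False
--                         break
--                 if not boundaries_ok:
--                     continue
--                 # bottom
--                 for j in range(c, c + n):
--                     if grid[r + n][j] != 5:
--                         boundaries_ok = False
--                         break
--                 if not boundaries_ok:
--                     continue
--                 # left
--                 for i in range(r, r + n):
--                     if grid[i][c - 1] != 5: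
--                         boundaries_ok = False
--                         break
--                 if not boundaries_ok:
--                     continue
--                 # right
--                 for i in range(r, r + n):
--                     if grid[i][c + n] != 5:
--                         boundaries_ok = False
--                         break
--                 if boundaries_ok:
--                     # fill with 2
--                     for i in range(r, r + n):
--                         for j in range(c, c + n):
--                             output[i][j] = 2
--     return output
-- ===== SOURCE B (Python) =====
-- def _prefix(row, w, v):
--     p = [0]
--     for j in range(w):
--         p.append(p[-1] + (1 if row[j] == v else 0))
--     return p
--
--
-- def transform(grid: list[list[int]]) -> list[list[int]]:
--     h = len(grid)
--     w = len(grid[0]) if grid else 0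
--     if h < 3 or w < 3:
--         return [row[:] for row in grid]
--     pz = [_prefix(row, w, 0) for row in grid]
--     pf = [_prefix(row, w, 5) for row in grid]
--     output = [row[:] for row in grid]
--     for n in range(1, min(h, w) + 1):
--         for r in range(1, h - n):
--             for c in range(1, w - n):
--                 if (pf[r - 1][c + n] - pf[r - 1][c] == n
--                         and pf[r + n][c + n] - pf[r + n][c] == n
--                         and all(pz[i][c + n] - pz[i][c] == n for i in range(r, r + n))
--                         and all(grid[i][c - 1] == 5 and grid[i][c + n] == 5 for i in range(r, r + n))):
--                     for i in range(r, r + n):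
--                         for j in range(c, c + n):
--                             output[i][j] = 2
--     return output
-- ===== Notes on version B (the rewrite author's own statement) =====
-- stated objective: faster
-- what changed: B precomputes per-row prefix counts of 0s and 5s once, so each candidate square's all-zero interior and 5-border rows are checked by O(1) prefix-sum differences per row instead of A's cell-by-cell rescans, and B enumerates only the interior (r,c) positions that A discards one by one with a boundary test.
-- outside the precondition, e.g. on transform([[7, 1, 1], [1, 3, 1], [1]]): A returns [[7, 1, 1], [1, 3, 1], [1]], B raises IndexError
import Mathlib
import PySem

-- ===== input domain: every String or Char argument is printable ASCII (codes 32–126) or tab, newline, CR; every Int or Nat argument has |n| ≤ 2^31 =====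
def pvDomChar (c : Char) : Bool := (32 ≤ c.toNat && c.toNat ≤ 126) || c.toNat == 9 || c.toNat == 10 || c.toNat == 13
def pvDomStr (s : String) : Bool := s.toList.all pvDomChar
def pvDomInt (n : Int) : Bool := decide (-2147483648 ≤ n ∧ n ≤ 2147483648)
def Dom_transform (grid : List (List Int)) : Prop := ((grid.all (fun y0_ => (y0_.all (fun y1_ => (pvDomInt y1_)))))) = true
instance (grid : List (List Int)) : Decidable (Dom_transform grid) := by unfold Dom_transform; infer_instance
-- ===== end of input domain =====

-- B replaces A's O(n^2) per-square all-zero scan and O(n) border-5 row scans by per-row prefix-count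
-- tables built once, and skips the boundary squares A enumerates and discards; return values are equal
-- on every rectangular (or degenerate, h<3 or w<3) grid.

-- ===== PORT A =====
-- shared indexing/fill helpers (both Pythons contain the identical `output[i][j] = 2` fill loops)
-- grid[i][j]: in-range on every admitted input, so the defaulted total form is exact here
def pvCell (g : List (List Int)) (i j : Int) : Int :=
  PySem.List.pyGetD (PySem.List.pyGetD g i []) j 0

-- output[i][j] = 2
def pvSetCell (out : List (List Int)) (i j : Int) : List (List Int) :=
  PySem.List.pySetD out i (PySem.List.pySetD (PySem.List.pyGetD out i []) j 2)

-- `for i in range(r, r+n): for j in range(c, c+n): output[i][j] = 2`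
def pvFill (out : List (List Int)) (r c n : Int) : List (List Int) :=
  (PySem.List.pyRange r (r + n)).foldl
    (fun o i => (PySem.List.pyRange c (c + n)).foldl (fun o2 j => pvSetCell o2 i j) o) out

-- the break-out scan loops of A compute exactly these bounded ∀s (decidable, hence computable)
def transform (grid : List (List Int)) : List (List Int) :=
  if grid = [] ∨ grid.headD [] = [] then grid   -- `[row[:] for row in grid]` = the same list value
  else
    let h : Int := grid.length
    let w : Int := (grid.headD []).length
    (PySem.List.pyRange 1 (min h w + 1)).foldl (fun out n =>
      (PySem.List.pyRange 0 (h - n + 1)).foldl (fun out r =>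
        (PySem.List.pyRange 0 (w - n + 1)).foldl (fun out c =>
          if r = 0 ∨ r + n = h ∨ c = 0 ∨ c + n = w then out
          else if ¬ (∀ i ∈ PySem.List.pyRange r (r + n), ∀ j ∈ PySem.List.pyRange c (c + n),
                      pvCell grid i j = 0) then out
          else if ¬ (∀ j ∈ PySem.List.pyRange c (c + n), pvCell grid (r - 1) j = 5) then out
          else if ¬ (∀ j ∈ PySem.List.pyRange c (c + n), pvCell grid (r + n) j = 5) then out
          else if ¬ (∀ i ∈ PySem.List.pyRange r (r + n), pvCell grid i (c - 1) = 5) then out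
          else if ¬ (∀ i ∈ PySem.List.pyRange r (r + n), pvCell grid i (c + n) = 5) then out
          else pvFill out r c n) out) out) grid

-- ===== PORT B =====
-- `_prefix(row, w, v)`: p=[0]; for j in range(w): p.append(p[-1] + (1 if row[j]==v else 0))
def pvPrefix (row : List Int) (w v : Int) : List Int :=
  (PySem.List.pyRange 0 w).foldl
    (fun p j => p ++ [PySem.List.pyGetD p (-1) 0 +
                      (if PySem.List.pyGetD row j 0 = v then 1 else 0)]) [0]

def transform_alt (grid : List (List Int)) : List (List Int) :=
  let h : Int := grid.length
  let w : Int := if grid = [] then 0 else ((grid.headD []).length : Int)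
  if h < 3 ∨ w < 3 then grid                    -- no internal square can exist; copy = same value
  else
    let pz := grid.map (fun row => pvPrefix row w 0)
    let pf := grid.map (fun row => pvPrefix row w 5)
    (PySem.List.pyRange 1 (min h w + 1)).foldl (fun out n =>
      (PySem.List.pyRange 1 (h - n)).foldl (fun out r =>
        (PySem.List.pyRange 1 (w - n)).foldl (fun out c =>
          if (pvCell pf (r - 1) (c + n) - pvCell pf (r - 1) c = n ∧
              pvCell pf (r + n) (c + n) - pvCell pf (r + n) c = n ∧
              (∀ i ∈ PySem.List.pyRange r (r + n),
                 pvCell pz i (c + n) - pvCell pz i c = n) ∧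
              (∀ i ∈ PySem.List.pyRange r (r + n),
                 pvCell grid i (c - 1) = 5 ∧ pvCell grid i (c + n) = 5))
          then pvFill out r c n else out) out) out) grid

-- ===== PRECONDITION & SPEC =====
-- Pre_ excludes ragged grids (rows of unequal length) with at least 3 rows and 3 columns: on those
-- A raises IndexError except when short-circuit evaluation happens to skip every short row, while
-- B's prefix pass always raises IndexError there.
def Pre_transform (grid : List (List Int)) : Prop :=
  grid.length < 3 ∨ (grid.headD []).length < 3 ∨
    ∀ row ∈ grid, row.length = (grid.headD []).length
instance (grid : List (List Int)) : Decidable (Pre_transform grid) := by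
  unfold Pre_transform; infer_instance

def pvWitness_transform : List (List Int) := [[0, 5, 0], [5, 0, 5], [0, 5, 0]]

def Spec_transform (grid : List (List Int)) (out : List (List Int)) : Prop := out = transform_alt grid
instance (grid : List (List Int)) (out : List (List Int)) : Decidable (Spec_transform grid out) := by
  unfold Spec_transform; infer_instance

-- ===== CLAIM (what is proved, stated in full; the proofs are below) =====
def Claim_equal_transform : Prop :=
  ∀ (grid : List (List Int)), Dom_transform grid → Pre_transform grid →
    Spec_transform grid (transform grid)

-- ===== LEMMAS AND PROOFS =====

-- a fold whose body fixes the state is the identity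
theorem pvFoldlId {α β : Type} (l : List α) (f : β → α → β) (b : β)
    (h : ∀ s x, x ∈ l → f s x = s) : l.foldl f b = b := by
  induction l generalizing b with
  | nil => rfl
  | cons x t ih =>
      simp only [List.foldl_cons]
      rw [h b x (by simp)]
      exact ih b (fun s y hy => h s y (by simp [hy]))

-- a 0..m loop that skips its first and last index is the 1..m-1 loop
theorem pvSkipEnds {β : Type} (f : β → Int → β) (m : Int) (hm : 0 ≤ m) (s : β) :
    (PySem.List.pyRange 0 (m + 1)).foldl
      (fun s r => if r = 0 ∨ r = m then s else f s r) s
    = (PySem.List.pyRange 1 m).foldl f s := by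
  rcases eq_or_lt_of_le hm with h0 | h0
  · rw [← h0]
    rw [show ((0:Int)+1) = 1 by ring, PySem.List.pyRange_one_cons (by omega),
        PySem.List.pyRange_one_eq_nil (by omega), PySem.List.pyRange_one_eq_nil (by omega)]
    simp
  · rw [PySem.List.pyRange_one_cons (by omega),
        PySem.List.pyRange_one_succ_right (by omega)]
    simp only [List.foldl_cons, List.foldl_append, List.foldl_nil, true_or, or_true, if_true]
    rw [show ((0:Int)+1) = 1 by ring]
    exact PySem.List.foldl_congr_mem _ _ _ _ (fun acc x hx => by
      rw [PySem.List.mem_pyRange_one] at hx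
      rw [if_neg (by omega)])

-- B's prefix builder computes the running countP table
theorem pvPrefix_eq (row : List Int) (v : Int) (m : Nat) (hm : m ≤ row.length) :
    pvPrefix row (m : Int) v
    = (List.range (m + 1)).map (fun k => ((row.take k).countP (· == v) : Int)) := by
  induction m with
  | zero => simp [pvPrefix, PySem.List.pyRange_one_eq_nil]
  | succ m ih =>
      have hm' : m ≤ row.length := by omega
      have hlt : m < row.length := by omega
      unfold pvPrefix at ih ⊢
      rw [show ((m+1 : Nat) : Int) = (m : Int) + 1 by push_cast; ring,
          PySem.List.pyRange_one_succ_right (by positivity), List.foldl_append,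
          List.foldl_cons, List.foldl_nil, ih hm']
      conv_rhs => rw [List.range_succ, List.map_append, List.map_singleton]
      congr 1
      rw [List.range_succ, List.map_append, List.map_singleton,
          PySem.List.pyGetD_neg_one_append_singleton]
      have hget : PySem.List.pyGetD row (m : Int) 0 = row[m] := by
        rw [PySem.List.pyGetD_natCast, List.getD_eq_getElem _ _ hlt]
      rw [hget, List.take_add_one, List.getElem?_eq_getElem hlt]
      simp only [List.countP_append, Option.toList_some, List.countP_singleton]
      push_cast
      by_cases hv : row[m] = v
      · simp [hv]
      · simp [hv, beq_iff_eq]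

-- pvCell into the prefix tables / into the grid, under the rectangularity bounds
theorem pvCellPrefix (grid : List (List Int)) (w : Nat)
    (hrect : ∀ row ∈ grid, row.length = w) (v i k : Int)
    (hi0 : 0 ≤ i) (hih : i < (grid.length : Int)) (hk0 : 0 ≤ k) (hkw : k ≤ (w : Int)) :
    pvCell (grid.map (fun row => pvPrefix row (w : Int) v)) i k
    = (((grid[i.toNat]'(by omega)).take k.toNat).countP (· == v) : Int) := by
  have hiN : i.toNat < grid.length := by omega
  unfold pvCell
  rw [PySem.List.pyGetD_eq_getElem _ [] hi0 (by simpa using hih)]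
  simp only [List.getElem_map]
  rw [pvPrefix_eq _ _ w (le_of_eq (hrect _ (List.getElem_mem hiN)).symm)]
  rw [PySem.List.pyGetD_eq_getElem _ 0 hk0 (by simp; omega)]
  rw [List.getElem_map, List.getElem_range]

theorem pvCellRow (grid : List (List Int)) (i j : Int)
    (hi0 : 0 ≤ i) (hih : i < (grid.length : Int)) (hj0 : 0 ≤ j)
    (hjw : j < ((grid[i.toNat]'(by omega) : List Int).length : Int)) :
    pvCell grid i j = (grid[i.toNat]'(by omega))[j.toNat]'(by omega) := by
  unfold pvCell
  rw [PySem.List.pyGetD_eq_getElem _ [] hi0 (by simpa using hih)]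
  exact PySem.List.pyGetD_eq_getElem _ 0 hj0 (by simpa using hjw)
-- the prefix-difference test over a row segment is the pointwise scan over that segment
theorem pvSegIff (grid : List (List Int)) (w : Nat)
    (hrect : ∀ row ∈ grid, row.length = w) (v i a n : Int)
    (hi0 : 0 ≤ i) (hih : i < (grid.length : Int)) (ha : 0 ≤ a) (hn : 0 ≤ n)
    (hb : a + n ≤ (w : Int)) :
    (pvCell (grid.map (fun row => pvPrefix row (w : Int) v)) i (a + n)
      - pvCell (grid.map (fun row => pvPrefix row (w : Int) v)) i a = n)
    ↔ (∀ j ∈ PySem.List.pyRange a (a + n), pvCell grid i j = v) := by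
  have hiN : i.toNat < grid.length := by omega
  have hrow : (grid[i.toNat]'hiN).length = w := hrect _ (List.getElem_mem hiN)
  rw [pvCellPrefix grid w hrect v i (a+n) hi0 hih (by omega) hb,
      pvCellPrefix grid w hrect v i a hi0 hih ha (by omega)]
  have hsplit : (a+n).toNat = a.toNat + n.toNat := by omega
  rw [hsplit, List.take_add, List.countP_append]
  set row := grid[i.toNat]'hiN with hrowdef
  set seg := (row.drop a.toNat).take n.toNat with hseg
  have hseglen : seg.length = n.toNat := by
    simp [hseg]; omega
  constructor
  · intro h j hj
    rw [PySem.List.mem_pyRange_one] at hj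
    have hcount : seg.countP (· == v) = n.toNat := by omega
    have hall : ∀ x ∈ seg, (x == v) = true := by
      rw [← List.countP_eq_length]; omega
    have hjlt : j.toNat < row.length := by omega
    rw [pvCellRow grid i j hi0 hih (by omega) (by rw [← hrowdef]; omega)]
    have hidx : j.toNat = a.toNat + (j.toNat - a.toNat) := by omega
    have hk : j.toNat - a.toNat < seg.length := by omega
    have hmem : row[j.toNat] ∈ seg := by
      have h2 : seg[j.toNat - a.toNat]'hk = row[j.toNat]'hjlt := by
        simp only [hseg, List.getElem_take, List.getElem_drop]
        congr 1
        omega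
      rw [← h2]
      exact List.getElem_mem hk
    simpa using hall _ hmem
  · intro h
    have hall : ∀ x ∈ seg, (x == v) = true := by
      rw [List.forall_mem_iff_getElem]
      intro k hk
      have hk' : k < n.toNat := by omega
      have : seg[k]'hk = row[a.toNat + k]'(by omega) := by
        simp [hseg, List.getElem_take, List.getElem_drop]
      rw [this]
      have hv := h ((a.toNat + k : Nat) : Int) (by rw [PySem.List.mem_pyRange_one]; omega)
      rw [pvCellRow grid i _ hi0 hih (by omega) (by rw [← hrowdef]; omega)] at hv
      simp only [Int.toNat_natCast] at hv
      have hv' : row[a.toNat + k]'(by omega) = v := hv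
      simp [hv']
    have := List.countP_eq_length.mpr hall
    omega

-- ===== VERDICT (by name: the statement is the Claim_ definition above) =====

-- boundary (r,c) pairs make A's square body a no-op
theorem pvInnerId (grid : List (List Int)) (h w n r : Int)
    (hcond : ∀ c, 0 ≤ c → c ≤ w - n → (r = 0 ∨ r + n = h ∨ c = 0 ∨ c + n = w)) (out : List (List Int)) :
    (PySem.List.pyRange 0 (w - n + 1)).foldl (fun out c =>
      if r = 0 ∨ r + n = h ∨ c = 0 ∨ c + n = w then out
      else if ¬ (∀ i ∈ PySem.List.pyRange r (r + n), ∀ j ∈ PySem.List.pyRange c (c + n),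
                  pvCell grid i j = 0) then out
      else if ¬ (∀ j ∈ PySem.List.pyRange c (c + n), pvCell grid (r - 1) j = 5) then out
      else if ¬ (∀ j ∈ PySem.List.pyRange c (c + n), pvCell grid (r + n) j = 5) then out
      else if ¬ (∀ i ∈ PySem.List.pyRange r (r + n), pvCell grid i (c - 1) = 5) then out
      else if ¬ (∀ i ∈ PySem.List.pyRange r (r + n), pvCell grid i (c + n) = 5) then out
      else pvFill out r c n) out = out := by
  apply pvFoldlId
  intro s c hc
  rw [PySem.List.mem_pyRange_one] at hc
  rw [if_pos (hcond c (by omega) (by omega))]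


-- A's square body equals B's square body at an interior (r, c)
set_option maxHeartbeats 2000000 in
theorem pvBodyEq (grid : List (List Int)) (W : Nat)
    (hrect : ∀ row ∈ grid, row.length = W) (n r c : Int) (hn1 : 1 ≤ n)
    (hr1 : 1 ≤ r) (hrh : r + n ≤ (grid.length : Int) - 1)
    (hc1 : 1 ≤ c) (hcw : c + n ≤ (W : Int) - 1) (out : List (List Int)) :
    (fun out c =>
          if r = 0 ∨ r + n = (grid.length : Int) ∨ c = 0 ∨ c + n = (W : Int) then out
          else if ¬ (∀ i ∈ PySem.List.pyRange r (r + n), ∀ j ∈ PySem.List.pyRange c (c + n),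
                      pvCell grid i j = 0) then out
          else if ¬ (∀ j ∈ PySem.List.pyRange c (c + n), pvCell grid (r - 1) j = 5) then out
          else if ¬ (∀ j ∈ PySem.List.pyRange c (c + n), pvCell grid (r + n) j = 5) then out
          else if ¬ (∀ i ∈ PySem.List.pyRange r (r + n), pvCell grid i (c - 1) = 5) then out
          else if ¬ (∀ i ∈ PySem.List.pyRange r (r + n), pvCell grid i (c + n) = 5) then out
          else pvFill out r c n) out c
    = (fun out c =>
          if (pvCell (grid.map (fun row => pvPrefix row (W : Int) 5)) (r - 1) (c + n)
                - pvCell (grid.map (fun row => pvPrefix row (W : Int) 5)) (r - 1) c = n ∧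
              pvCell (grid.map (fun row => pvPrefix row (W : Int) 5)) (r + n) (c + n)
                - pvCell (grid.map (fun row => pvPrefix row (W : Int) 5)) (r + n) c = n ∧
              (∀ i ∈ PySem.List.pyRange r (r + n),
                 pvCell (grid.map (fun row => pvPrefix row (W : Int) 0)) i (c + n)
                   - pvCell (grid.map (fun row => pvPrefix row (W : Int) 0)) i c = n) ∧
              (∀ i ∈ PySem.List.pyRange r (r + n),
                 pvCell grid i (c - 1) = 5 ∧ pvCell grid i (c + n) = 5))
          then pvFill out r c n else out) out c := by
  beta_reduce
  have hT := pvSegIff grid W hrect 5 (r - 1) c n (by omega) (by omega) (by omega)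
    (by omega) (by omega)
  have hBo := pvSegIff grid W hrect 5 (r + n) c n (by omega) (by omega) (by omega)
    (by omega) (by omega)
  have hZ : (∀ i ∈ PySem.List.pyRange r (r + n),
        pvCell (grid.map (fun row => pvPrefix row (W : Int) 0)) i (c + n)
          - pvCell (grid.map (fun row => pvPrefix row (W : Int) 0)) i c = n)
      ↔ (∀ i ∈ PySem.List.pyRange r (r + n), ∀ j ∈ PySem.List.pyRange c (c + n),
          pvCell grid i j = 0) :=
    forall_congr' (fun i => imp_congr_right (fun hi => by
      rw [PySem.List.mem_pyRange_one] at hi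
      exact pvSegIff grid W hrect 0 i c n (by omega) (by omega) (by omega)
        (by omega) (by omega)))
  have hLR : (∀ i ∈ PySem.List.pyRange r (r + n),
        pvCell grid i (c - 1) = 5 ∧ pvCell grid i (c + n) = 5)
      ↔ ((∀ i ∈ PySem.List.pyRange r (r + n), pvCell grid i (c - 1) = 5) ∧
         (∀ i ∈ PySem.List.pyRange r (r + n), pvCell grid i (c + n) = 5)) :=
    ⟨fun h => ⟨fun i hi => (h i hi).1, fun i hi => (h i hi).2⟩,
     fun h i hi => ⟨h.1 i hi, h.2 i hi⟩⟩
  rw [if_neg (by omega)]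
  rw [if_congr ((and_congr hT (and_congr hBo (and_congr hZ hLR)))) rfl rfl]
  by_cases hz : (∀ i ∈ PySem.List.pyRange r (r + n), ∀ j ∈ PySem.List.pyRange c (c + n),
      pvCell grid i j = 0) <;>
    by_cases ht : (∀ j ∈ PySem.List.pyRange c (c + n), pvCell grid (r - 1) j = 5) <;>
    by_cases hbo : (∀ j ∈ PySem.List.pyRange c (c + n), pvCell grid (r + n) j = 5) <;>
    by_cases hl : (∀ i ∈ PySem.List.pyRange r (r + n), pvCell grid i (c - 1) = 5) <;>
    by_cases hri : (∀ i ∈ PySem.List.pyRange r (r + n), pvCell grid i (c + n) = 5) <;>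
    simp_all [PySem.List.mem_pyRange_one]

-- A's column loop at an interior row equals B's
theorem pvColEq (grid : List (List Int)) (W : Nat)
    (hrect : ∀ row ∈ grid, row.length = W) (n r : Int) (hn1 : 1 ≤ n) (hnw : n ≤ (W : Int))
    (hr1 : 1 ≤ r) (hrh : r + n ≤ (grid.length : Int) - 1) (out : List (List Int)) :
    (PySem.List.pyRange 0 ((W : Int) - n + 1)).foldl (fun out c =>
          if r = 0 ∨ r + n = (grid.length : Int) ∨ c = 0 ∨ c + n = (W : Int) then out
          else if ¬ (∀ i ∈ PySem.List.pyRange r (r + n), ∀ j ∈ PySem.List.pyRange c (c + n),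
                      pvCell grid i j = 0) then out
          else if ¬ (∀ j ∈ PySem.List.pyRange c (c + n), pvCell grid (r - 1) j = 5) then out
          else if ¬ (∀ j ∈ PySem.List.pyRange c (c + n), pvCell grid (r + n) j = 5) then out
          else if ¬ (∀ i ∈ PySem.List.pyRange r (r + n), pvCell grid i (c - 1) = 5) then out
          else if ¬ (∀ i ∈ PySem.List.pyRange r (r + n), pvCell grid i (c + n) = 5) then out
          else pvFill out r c n) out
    = (PySem.List.pyRange 1 ((W : Int) - n)).foldl (fun out c =>
          if (pvCell (grid.map (fun row => pvPrefix row (W : Int) 5)) (r - 1) (c + n)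
                - pvCell (grid.map (fun row => pvPrefix row (W : Int) 5)) (r - 1) c = n ∧
              pvCell (grid.map (fun row => pvPrefix row (W : Int) 5)) (r + n) (c + n)
                - pvCell (grid.map (fun row => pvPrefix row (W : Int) 5)) (r + n) c = n ∧
              (∀ i ∈ PySem.List.pyRange r (r + n),
                 pvCell (grid.map (fun row => pvPrefix row (W : Int) 0)) i (c + n)
                   - pvCell (grid.map (fun row => pvPrefix row (W : Int) 0)) i c = n) ∧
              (∀ i ∈ PySem.List.pyRange r (r + n),
                 pvCell grid i (c - 1) = 5 ∧ pvCell grid i (c + n) = 5))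
          then pvFill out r c n else out) out := by
  rw [← pvSkipEnds (fun out c =>
          if (pvCell (grid.map (fun row => pvPrefix row (W : Int) 5)) (r - 1) (c + n)
                - pvCell (grid.map (fun row => pvPrefix row (W : Int) 5)) (r - 1) c = n ∧
              pvCell (grid.map (fun row => pvPrefix row (W : Int) 5)) (r + n) (c + n)
                - pvCell (grid.map (fun row => pvPrefix row (W : Int) 5)) (r + n) c = n ∧
              (∀ i ∈ PySem.List.pyRange r (r + n),
                 pvCell (grid.map (fun row => pvPrefix row (W : Int) 0)) i (c + n)
                   - pvCell (grid.map (fun row => pvPrefix row (W : Int) 0)) i c = n) ∧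
              (∀ i ∈ PySem.List.pyRange r (r + n),
                 pvCell grid i (c - 1) = 5 ∧ pvCell grid i (c + n) = 5))
          then pvFill out r c n else out) ((W : Int) - n) (by omega) out]
  apply PySem.List.foldl_congr_mem
  intro acc c hc
  rw [PySem.List.mem_pyRange_one] at hc
  by_cases hcb : c = 0 ∨ c = (W : Int) - n
  · rw [if_pos hcb, if_pos (show r = 0 ∨ r + n = (grid.length : Int) ∨ c = 0 ∨
      c + n = (W : Int) by omega)]
  · rw [if_neg hcb]
    exact pvBodyEq grid W hrect n r c hn1 hr1 hrh (by omega) (by omega) acc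

-- A's row loop for a given size n equals B's
theorem pvRowEq (grid : List (List Int)) (W : Nat)
    (hrect : ∀ row ∈ grid, row.length = W) (n : Int)
    (_hh3 : 3 ≤ grid.length) (_hw3 : 3 ≤ W) (hn1 : 1 ≤ n)
    (hnh : n ≤ (grid.length : Int)) (hnw : n ≤ (W : Int)) (out : List (List Int)) :
    (PySem.List.pyRange 0 ((grid.length : Int) - n + 1)).foldl (fun out r =>
      (PySem.List.pyRange 0 ((W : Int) - n + 1)).foldl (fun out c =>
          if r = 0 ∨ r + n = (grid.length : Int) ∨ c = 0 ∨ c + n = (W : Int) then out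
          else if ¬ (∀ i ∈ PySem.List.pyRange r (r + n), ∀ j ∈ PySem.List.pyRange c (c + n),
                      pvCell grid i j = 0) then out
          else if ¬ (∀ j ∈ PySem.List.pyRange c (c + n), pvCell grid (r - 1) j = 5) then out
          else if ¬ (∀ j ∈ PySem.List.pyRange c (c + n), pvCell grid (r + n) j = 5) then out
          else if ¬ (∀ i ∈ PySem.List.pyRange r (r + n), pvCell grid i (c - 1) = 5) then out
          else if ¬ (∀ i ∈ PySem.List.pyRange r (r + n), pvCell grid i (c + n) = 5) then out
          else pvFill out r c n) out) out
    = (PySem.List.pyRange 1 ((grid.length : Int) - n)).foldl (fun out r =>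
      (PySem.List.pyRange 1 ((W : Int) - n)).foldl (fun out c =>
          if (pvCell (grid.map (fun row => pvPrefix row (W : Int) 5)) (r - 1) (c + n)
                - pvCell (grid.map (fun row => pvPrefix row (W : Int) 5)) (r - 1) c = n ∧
              pvCell (grid.map (fun row => pvPrefix row (W : Int) 5)) (r + n) (c + n)
                - pvCell (grid.map (fun row => pvPrefix row (W : Int) 5)) (r + n) c = n ∧
              (∀ i ∈ PySem.List.pyRange r (r + n),
                 pvCell (grid.map (fun row => pvPrefix row (W : Int) 0)) i (c + n)
                   - pvCell (grid.map (fun row => pvPrefix row (W : Int) 0)) i c = n) ∧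
              (∀ i ∈ PySem.List.pyRange r (r + n),
                 pvCell grid i (c - 1) = 5 ∧ pvCell grid i (c + n) = 5))
          then pvFill out r c n else out) out) out := by
  rw [← pvSkipEnds (fun out r => (PySem.List.pyRange 1 ((W : Int) - n)).foldl (fun out c =>
          if (pvCell (grid.map (fun row => pvPrefix row (W : Int) 5)) (r - 1) (c + n)
                - pvCell (grid.map (fun row => pvPrefix row (W : Int) 5)) (r - 1) c = n ∧
              pvCell (grid.map (fun row => pvPrefix row (W : Int) 5)) (r + n) (c + n)
                - pvCell (grid.map (fun row => pvPrefix row (W : Int) 5)) (r + n) c = n ∧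
              (∀ i ∈ PySem.List.pyRange r (r + n),
                 pvCell (grid.map (fun row => pvPrefix row (W : Int) 0)) i (c + n)
                   - pvCell (grid.map (fun row => pvPrefix row (W : Int) 0)) i c = n) ∧
              (∀ i ∈ PySem.List.pyRange r (r + n),
                 pvCell grid i (c - 1) = 5 ∧ pvCell grid i (c + n) = 5))
          then pvFill out r c n else out) out)
        ((grid.length : Int) - n) (by omega) out]
  apply PySem.List.foldl_congr_mem
  intro acc r hr
  rw [PySem.List.mem_pyRange_one] at hr
  by_cases hrb : r = 0 ∨ r = (grid.length : Int) - n
  · rw [if_pos hrb]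
    exact pvInnerId grid (grid.length : Int) (W : Int) n r (fun c hc0 hc1 => by omega) acc
  · rw [if_neg hrb]
    exact pvColEq grid W hrect n r hn1 hnw (by omega) (by omega) acc

theorem transform_spec : Claim_equal_transform := by
  intro grid _dom pre
  unfold Spec_transform
  by_cases hsmall : grid.length < 3 ∨ (grid.headD []).length < 3
  · -- degenerate case: no internal square exists; both sides return grid
    have hB : transform_alt grid = grid := by
      unfold transform_alt
      rw [if_pos]
      rcases hsmall with h1 | h2
      · left; exact_mod_cast (by exact_mod_cast h1 : (grid.length : Int) < 3)
      · by_cases hg : grid = []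
        · left; simp [hg]
        · right; rw [if_neg hg]; exact_mod_cast h2
    rw [hB]
    unfold transform
    by_cases hg : grid = [] ∨ grid.headD [] = []
    · rw [if_pos hg]
    · rw [if_neg hg]
      push Not at hg
      have hh1 : 1 ≤ grid.length := by
        rcases grid with _ | _ <;> simp_all
      have hw1 : 1 ≤ (grid.headD []).length := by
        rcases hg with ⟨_, h2⟩
        rcases h : grid.headD [] with _ | _ <;> simp_all
      apply pvFoldlId
      intro out n hn
      rw [PySem.List.mem_pyRange_one] at hn
      apply pvFoldlId
      intro out2 r hr
      rw [PySem.List.mem_pyRange_one] at hr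
      apply pvInnerId
      intro c hc0 hc1
      omega
  · -- main case: h ≥ 3, w ≥ 3, grid rectangular
    push Not at hsmall
    obtain ⟨hh3, hw3⟩ := hsmall
    set W : Nat := (grid.headD []).length with hW
    have hrect : ∀ row ∈ grid, row.length = W := by
      rcases pre with h1 | h2 | h3
      · omega
      · omega
      · exact h3
    have hgne : grid ≠ [] := by
      intro h; rw [h] at hh3; simp at hh3
    have hhne : grid.headD [] ≠ [] := by
      intro h; rw [hW, h] at hw3; simp at hw3
    unfold transform transform_alt
    rw [if_neg (by push Not; exact ⟨hgne, hhne⟩), if_neg (by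
      push Not
      constructor
      · exact_mod_cast hh3
      · rw [if_neg hgne]; exact_mod_cast hw3)]
    rw [if_neg hgne]
    set h : Int := (grid.length : Int) with hhdef
    apply PySem.List.foldl_congr_mem
    intro out n hn
    rw [PySem.List.mem_pyRange_one] at hn
    have hnh : n ≤ h := by
      have h2 := hn.2
      have h3 : n ≤ min h ((grid.headD []).length : Int) := by
        omega
      have h4 := min_le_left h ((grid.headD []).length : Int)
      omega
    have hnw : n ≤ ((grid.headD []).length : Int) := by
      have h2 := hn.2
      have h3 : n ≤ min h ((grid.headD []).length : Int) := by
        omega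
      have h4 := min_le_right h ((grid.headD []).length : Int)
      omega
    exact pvRowEq grid (grid.headD []).length hrect n (by exact_mod_cast hh3)
      (by exact_mod_cast hw3) hn.1 hnh hnw out
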